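-- pv_equiv track=rewrite | github.com/camjoe/trading_strategies | trading/interfaces/runtime/jobs/daily_paper_trading.py | group_accounts_by_caps
-- ===== SOURCE A (Python) =====
-- def group_accounts_by_caps(
--     accounts: list[str],
--     caps: dict[str, tuple[int, int]],
-- ) -> dict[tuple[int, int], list[str]]:
--     grouped: dict[tuple[int, int], list[str]] = {}
--     for account in accounts:
--         grouped.setdefault(caps[account], []).append(account)
--     return grouped
-- ===== SOURCE B (Python) =====
-- def group_accounts_by_caps(
--     accounts: list[str],
--     caps: dict[str, tuple[int, int]],
-- ) -> dict[tuple[int, int], list[str]]: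
--     # Partition loop: repeatedly take the cap of the first remaining account,
--     # peel off its whole group with one scan, and continue on what is left,
--     # instead of A's one-pass setdefault/append hash grouping.
--     result: dict[tuple[int, int], list[str]] = {}
--     rest = accounts
--     while rest:
--         cap = caps[rest[0]]
--         result[cap] = [a for a in rest if caps[a] == cap]
--         rest = [a for a in rest if caps[a] != cap]
--     return result
-- ===== Notes on version B (the rewrite author's own statement) =====
-- stated objective: alternative
-- what changed: Replaced the single-pass hash grouping (setdefault+append into a dict) by a partition loop: peel off the first remaining account's whole cap-group with one scan, then repeat on the accounts that are left.
import Mathlib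
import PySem

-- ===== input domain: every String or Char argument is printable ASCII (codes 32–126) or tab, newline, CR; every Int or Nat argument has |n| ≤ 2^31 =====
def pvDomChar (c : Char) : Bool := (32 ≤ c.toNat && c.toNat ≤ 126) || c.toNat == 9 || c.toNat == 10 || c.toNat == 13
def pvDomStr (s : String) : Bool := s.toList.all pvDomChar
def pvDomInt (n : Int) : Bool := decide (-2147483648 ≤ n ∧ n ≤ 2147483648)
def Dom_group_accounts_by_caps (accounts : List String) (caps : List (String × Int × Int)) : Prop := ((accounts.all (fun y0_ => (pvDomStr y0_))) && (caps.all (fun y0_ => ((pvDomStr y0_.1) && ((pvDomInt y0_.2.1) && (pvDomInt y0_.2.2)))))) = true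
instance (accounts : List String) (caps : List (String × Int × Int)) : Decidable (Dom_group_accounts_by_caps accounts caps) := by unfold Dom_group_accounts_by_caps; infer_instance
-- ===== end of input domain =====

-- B replaces A's one-pass setdefault/append hash grouping by a partition loop
-- (peel off the first remaining account's whole cap-group with one scan, repeat
-- on the rest); objective: alternative (not faster).

-- ===== PORT A =====
-- grouped.setdefault(caps[account], []).append(account)  ==  grouped[c] = grouped.get(c, []) + [account],
-- which is exactly PySem.Dict.modify c [] (· ++ [account]).  caps[account] raising KeyError (get? = none)
-- is excluded by Pre_; on such inputs the port skips the account.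
def group_accounts_by_caps (accounts : List String) (caps : List (String × Int × Int)) : List (Int × Int × List String) :=
  let grouped : PySem.Dict (Int × Int) (List String) :=
    accounts.foldl (fun g account =>
      match (PySem.Dict.mk caps).get? account with
      | some cap => g.modify cap [] (· ++ [account])
      | none => g) PySem.Dict.empty
  grouped.items.map (fun p => (p.1.1, p.1.2, p.2))

-- ===== PORT B =====
-- the 'while rest:' partition loop of Source B as a recursion on the remaining accounts;
-- caps[rest[0]] raising KeyError (get? = none) is excluded by Pre_; on such inputs
-- the port drops that account and continues.
def pvPartition (caps : List (String × Int × Int)) (rest : List String) : List (Int × Int × List String) :=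
  match rest with
  | [] => []
  | a :: rs =>
    match h : (PySem.Dict.mk caps).get? a with
    | none => pvPartition caps rs
    | some cap =>
      (cap.1, cap.2, (a :: rs).filter (fun x => (PySem.Dict.mk caps).get? x == some cap)) ::
      pvPartition caps ((a :: rs).filter (fun x => !((PySem.Dict.mk caps).get? x == some cap)))
termination_by rest.length
decreasing_by
  · simp
  · simp only [List.filter_cons, h, beq_self_eq_true, Bool.not_true, Bool.false_eq_true,
      if_false, List.length_cons]
    have := List.length_filter_le (fun x => !((PySem.Dict.mk caps).get? x == some cap)) rs
    omega

def group_accounts_by_caps_alt (accounts : List String) (caps : List (String × Int × Int)) : List (Int × Int × List String) :=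
  pvPartition caps accounts

-- ===== PRECONDITION & SPEC =====
-- Pre_ excludes exactly the inputs on which Python A raises KeyError: an account missing from caps.
def Pre_group_accounts_by_caps (accounts : List String) (caps : List (String × Int × Int)) : Prop :=
  ∀ a ∈ accounts, ∃ t ∈ caps, t.1 = a
instance (accounts : List String) (caps : List (String × Int × Int)) : Decidable (Pre_group_accounts_by_caps accounts caps) := by unfold Pre_group_accounts_by_caps; infer_instance

def pvWitness_group_accounts_by_caps : List String × (List (String × Int × Int)) :=
  (["x", "y", "x", "z"], [("x", 1, 2), ("y", 3, 4), ("z", 1, 2)])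

def Spec_group_accounts_by_caps (accounts : List String) (caps : List (String × Int × Int)) (out : List (Int × Int × List String)) : Prop := out = group_accounts_by_caps_alt accounts caps
instance (accounts : List String) (caps : List (String × Int × Int)) (out : List (Int × Int × List String)) : Decidable (Spec_group_accounts_by_caps accounts caps out) := by unfold Spec_group_accounts_by_caps; infer_instance

-- ===== CLAIM (what is proved, stated in full; the proofs are below) =====
def Claim_equal_group_accounts_by_caps : Prop := ∀ (accounts : List String) (caps : List (String × Int × Int)), Dom_group_accounts_by_caps accounts caps → Pre_group_accounts_by_caps accounts caps → Spec_group_accounts_by_caps accounts caps (group_accounts_by_caps accounts caps)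

-- ===== LEMMAS AND PROOFS =====

-- total lookup used only inside the proofs
def capOf (caps : List (String × Int × Int)) (a : String) : Int × Int :=
  ((PySem.Dict.mk caps).get? a).getD (0, 0)

theorem get?_of_pre {caps : List (String × Int × Int)} {a : String}
    (h : ∃ t ∈ caps, t.1 = a) :
    (PySem.Dict.mk caps).get? a = some (capOf caps a) := by
  have hs : ((PySem.Dict.mk caps).get? a).isSome := by
    induction caps with
    | nil => simp at h
    | cons t rest ih =>
      rcases h with ⟨u, hu, hua⟩
      rw [PySem.Dict.get?_mk_cons]
      by_cases ht : (t.1 == a) = true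
      · simp [ht]
      · rcases List.mem_cons.mp hu with rfl | hu'
        · simp at ht; exact absurd hua ht
        · simp only [ht]
          exact ih ⟨u, hu', hua⟩
  obtain ⟨v, hv⟩ := Option.isSome_iff_exists.mp hs
  simp [capOf, hv]

-- the common normal form both ports are reduced to
def pvNorm (caps : List (String × Int × Int)) (accounts : List String) : List (Int × Int × List String) :=
  (PySem.Set.ofList (accounts.map (capOf caps))).map
    (fun c => (c.1, c.2, accounts.filter (fun a => capOf caps a == c)))

-- skipping elements already present leaves a Set.add fold unchanged
theorem foldl_add_filter_ne {α : Type} [BEq α] [LawfulBEq α]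
    (l : List α) (s : List α) (x : α) (hx : x ∈ s) :
    l.foldl PySem.Set.add s = (l.filter (fun y => !(y == x))).foldl PySem.Set.add s := by
  induction l generalizing s with
  | nil => rfl
  | cons y l ih =>
    by_cases hy : (y == x) = true
    · have hyx : y = x := eq_of_beq hy
      simp only [List.filter_cons, hy, Bool.not_true, List.foldl_cons]
      rw [PySem.Set.add_of_mem (by rw [hyx]; exact hx)]
      exact ih s hx
    · simp only [List.filter_cons, eq_false_of_ne_true hy, Bool.not_false, List.foldl_cons]
      exact ih (PySem.Set.add s y) (by
        rw [PySem.Set.add_eq_ite]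
        split
        · exact hx
        · exact List.mem_append_left _ hx)

theorem foldl_add_cons {α : Type} [BEq α] [LawfulBEq α]
    (l : List α) (s : List α) (x : α) (hl : ∀ y ∈ l, (y == x) = false) :
    l.foldl PySem.Set.add (x :: s) = x :: l.foldl PySem.Set.add s := by
  induction l generalizing s with
  | nil => rfl
  | cons y l ih =>
    have hyx : ¬ y = x := by
      intro h; have := hl y (List.mem_cons_self) ; simp [h] at this
    have hstep : PySem.Set.add (x :: s) y = x :: PySem.Set.add s y := by
      rw [PySem.Set.add_eq_ite, PySem.Set.add_eq_ite]
      by_cases hys : y ∈ s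
      · simp [hys, List.mem_cons]
      · have : ¬ y ∈ x :: s := by simp [List.mem_cons, hyx, hys]
        simp [hys, this]
    simp only [List.foldl_cons, hstep]
    exact ih (PySem.Set.add s y) (fun z hz => hl z (List.mem_cons_of_mem _ hz))

-- first-occurrence dedup, partition style
theorem ofList_cons_filter {α : Type} [BEq α] [LawfulBEq α] (x : α) (l : List α) :
    PySem.Set.ofList (x :: l) = x :: PySem.Set.ofList (l.filter (fun y => !(y == x))) := by
  have h1 : PySem.Set.ofList (x :: l) = l.foldl PySem.Set.add [x] := by
    rw [PySem.Set.ofList_eq_foldl]; rfl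
  rw [h1, foldl_add_filter_ne l [x] x (List.mem_singleton.mpr rfl)]
  rw [show ([x] : List α) = x :: [] from rfl]
  rw [foldl_add_cons _ _ _ (by
    intro y hy
    have := List.of_mem_filter hy
    simpa using this)]
  rw [PySem.Set.ofList_eq_foldl]

-- B's partition recursion computes the normal form
theorem pvPartition_eq_norm (caps : List (String × Int × Int)) (l : List String)
    (hsome : ∀ a ∈ l, (PySem.Dict.mk caps).get? a = some (capOf caps a)) :
    pvPartition caps l = pvNorm caps l := by
  induction hlen : l.length using Nat.strong_induction_on generalizing l with
  | _ n ih =>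
  match l, hlen with
  | [], _ => simp [pvPartition, pvNorm, PySem.Set.ofList]
  | a :: rs, hlen =>
    have ha := hsome a List.mem_cons_self
    rw [pvPartition, ha]
    simp only
    set f := capOf caps with hf
    -- the get?-based predicates agree with the capOf-based ones on members
    have hfilt_eq : ∀ (c : Int × Int),
        ((a :: rs).filter (fun x => (PySem.Dict.mk caps).get? x == some c))
          = (a :: rs).filter (fun x => f x == c) := by
      intro c
      apply List.filter_congr
      intro x hx
      rw [hsome x hx]
      simp
    have hfilt_ne :
        ((a :: rs).filter (fun x => !((PySem.Dict.mk caps).get? x == some (f a))))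
          = (a :: rs).filter (fun x => !(f x == f a)) := by
      apply List.filter_congr
      intro x hx
      rw [hsome x hx]
      simp
    set rest := (a :: rs).filter (fun x => !(f x == f a)) with hrest
    have hrest_sub : ∀ x ∈ rest, x ∈ a :: rs := fun x hx => List.mem_of_mem_filter hx
    have hrest_len : rest.length < n := by
      rw [← hlen]
      rw [hrest]
      simp only [List.filter_cons, beq_self_eq_true, Bool.not_true, Bool.false_eq_true,
        if_false, List.length_cons]
      have := List.length_filter_le (fun x => !(f x == f a)) rs
      omega
    have hIH : pvPartition caps rest = pvNorm caps rest :=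
      ih rest.length hrest_len rest (fun x hx => hsome x (hrest_sub x hx)) rfl
    rw [hfilt_eq (f a), hfilt_ne, hIH]
    -- now expand both normal forms
    unfold pvNorm
    have hmapf : rest.map f = ((a :: rs).map f).filter (fun y => !(y == f a)) := by
      rw [hrest, List.filter_map]
      simp [Function.comp_def]
    have hofl : PySem.Set.ofList ((a :: rs).map f)
        = f a :: PySem.Set.ofList (rest.map f) := by
      rw [hmapf, List.map_cons, ofList_cons_filter]
      simp
    rw [hofl, List.map_cons]
    congr 1
    apply List.map_congr_left
    intro c hc
    have hc_mem : c ∈ rest.map f := by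
      have : c ∈ PySem.Set.ofList (rest.map f) := hc
      rwa [PySem.Set.mem_ofList] at this
    have hcne : (c == f a) = false := by
      obtain ⟨x, hx, rfl⟩ := List.mem_map.mp hc_mem
      have := List.of_mem_filter (p := fun x => !(f x == f a)) hx
      simpa using this
    have : rest.filter (fun x => f x == c) = (a :: rs).filter (fun x => f x == c) := by
      rw [hrest, List.filter_filter]
      apply List.filter_congr
      intro x _
      by_cases hxc : (f x == c) = true
      · have : ¬ (f x == f a) = true := by
          intro h
          have h1 : f x = c := eq_of_beq hxc
          have h2 : f x = f a := eq_of_beq h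
          rw [h1] at h2
          simp [h2] at hcne
        simp [hxc, this]
      · simp [eq_false_of_ne_true hxc]
    rw [this]

-- A's fold computes the normal form (same derivation as before)
theorem groupA_eq_norm (accounts : List String) (caps : List (String × Int × Int))
    (hsome : ∀ a ∈ accounts, (PySem.Dict.mk caps).get? a = some (capOf caps a)) :
    group_accounts_by_caps accounts caps = pvNorm caps accounts := by
  unfold group_accounts_by_caps
  dsimp only
  have hA : accounts.foldl (fun (g : PySem.Dict (Int × Int) (List String)) account =>
      match (PySem.Dict.mk caps).get? account with
      | some cap => g.modify cap [] (· ++ [account])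
      | none => g) PySem.Dict.empty
      = accounts.foldl (fun g account => g.modify (capOf caps account) [] (· ++ [account])) PySem.Dict.empty := by
    apply PySem.List.foldl_congr_mem' (h := ?_)
    intro x hx acc; rw [hsome x hx]
  rw [hA]
  set f := capOf caps with hf
  set G := accounts.foldl (fun (g : PySem.Dict (Int × Int) (List String)) account =>
      g.modify (f account) [] (· ++ [account])) PySem.Dict.empty with hG
  have hkeys : G.keys = PySem.Set.ofList (accounts.map f) := by
    rw [hG, PySem.Dict.keys_foldl_modify_key]
    simp [PySem.Set.update_nil_left]
  have hnodup : G.keys.Nodup := by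
    rw [hkeys]; exact PySem.Set.nodup_ofList _
  have hgetD : ∀ c, G.getD c [] = accounts.filter (fun a => f a == c) := by
    intro c
    have hmap : G = (accounts.map (fun a => (f a, a))).foldl
        (fun (d : PySem.Dict (Int × Int) (List String)) p => d.modify p.1 [] (· ++ [p.2])) PySem.Dict.empty := by
      rw [hG, List.foldl_map]
    rw [hmap, PySem.Dict.getD_foldl_modify_append]
    simp [List.filter_map, Function.comp_def]
  rw [PySem.Dict.items_eq_map_keys G hnodup (dflt := []), hkeys]
  rw [List.map_map]
  unfold pvNorm
  apply List.map_congr_left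
  intro c hc
  simp only [Function.comp]
  rw [hgetD c]

-- ===== VERDICT (by name: the statement is the Claim_ definition above) =====
theorem group_accounts_by_caps_spec : Claim_equal_group_accounts_by_caps := by
  intro accounts caps _ hpre
  have hsome : ∀ a ∈ accounts, (PySem.Dict.mk caps).get? a = some (capOf caps a) :=
    fun a ha => get?_of_pre (hpre a ha)
  show group_accounts_by_caps accounts caps = group_accounts_by_caps_alt accounts caps
  rw [groupA_eq_norm accounts caps hsome]
  unfold group_accounts_by_caps_alt
  rw [pvPartition_eq_norm caps accounts hsome]
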